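-- pv_equiv track=rewrite | github.com/HS587885/Algorithm | 250607/함수를 이용한 연속부분수열 여부 판단하기/to-determine-whether-a-continuous-subsequence-is-made-using-a-function.py | f
-- ===== SOURCE A (Python) =====
-- def f(a,b):
--     if len(a) > len(b):
--         for i in range(len(b), len(a)):
--             if a[i - len(b):i] == b:
--                 return "Yes"
--         return "No"
--     else:
--         for i in range(len(a), len(b)):
--              if b[i - len(a):i] == a:
--                 return "Yes"
--         return "No"
-- ===== SOURCE B (Python) =====
-- def f(a, b):
--     # Rabin-Karp rolling-hash search (verify on hash hit, so exact) for the
--     # shorter list as a contiguous block of the longer one; checks every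
--     # window, including the one ending at the last element.
--     s, l = (b, a) if len(a) > len(b) else (a, b)
--     m, n = len(s), len(l)
--     if m == 0:
--         return "Yes"
--     BASE = 1 << 32
--     P = (1 << 61) - 1
--     top = pow(BASE, m - 1, P)
--     hs = 0
--     for v in s:
--         hs = (hs * BASE + v) % P
--     h = 0
--     for v in l[:m]:
--         h = (h * BASE + v) % P
--     j = 0
--     while True:
--         if h == hs and l[j:j + m] == s:
--             return "Yes"
--         if j + m >= n:
--             return "No"
--         h = ((h - l[j] * top) * BASE + l[j + m]) % P
--         j += 1
-- ===== Notes on version B (the rewrite author's own statement) =====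
-- stated objective: alternative
-- what changed: Replaces A's per-window slice comparison with a Rabin-Karp rolling hash (verify on hash hit, so exact) over the same ordered (shorter, longer) pair, and checks every window including the final one A's loop skips.
-- intended difference: When the shorter list occurs as a contiguous block of the longer only as its suffix (including two equal-length equal lists), A returns 'No' because its loop never checks the window ending at the last element, while B returns 'Yes', which is the intended answer to the contiguous-subsequence question. — e.g. on f([1, 2], [2]): A returns "No", B returns "Yes"
import Mathlib
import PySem

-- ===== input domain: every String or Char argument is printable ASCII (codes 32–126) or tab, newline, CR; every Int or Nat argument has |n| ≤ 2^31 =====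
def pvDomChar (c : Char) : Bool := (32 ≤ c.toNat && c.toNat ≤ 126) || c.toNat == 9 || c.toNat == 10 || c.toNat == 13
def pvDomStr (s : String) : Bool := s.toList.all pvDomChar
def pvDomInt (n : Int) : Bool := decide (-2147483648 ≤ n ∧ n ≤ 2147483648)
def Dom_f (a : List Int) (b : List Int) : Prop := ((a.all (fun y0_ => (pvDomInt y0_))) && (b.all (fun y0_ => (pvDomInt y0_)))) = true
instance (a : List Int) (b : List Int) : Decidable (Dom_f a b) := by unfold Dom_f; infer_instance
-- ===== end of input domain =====

-- B replaces A's sliding slice-comparison (which never checks the window ending at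
-- the last element) with a Rabin-Karp rolling hash that verifies on a hash hit and
-- checks every window; outside D_f (the suffix-only-match inputs) they agree.

-- ===== PORT A =====
-- the loop 'for i in range(len(y), len(x))' of A, as recursion on the index i
def fLoop (x y : List Int) (i : Nat) : String :=
  if _h : i < x.length then
    if PySem.List.slice x (some ((i : Int) - (y.length : Int))) (some (i : Int)) = y then "Yes"
    else fLoop x y (i + 1)
  else "No"
termination_by x.length - i

def f (a : List Int) (b : List Int) : String :=
  if a.length > b.length then fLoop a b b.length
  else fLoop b a a.length

-- ===== PORT B =====
def pvBASE : Int := 4294967296         -- 1 << 32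
def pvP : Int := 2305843009213693951   -- (1 << 61) - 1

-- the 'while True' loop of B; h is the rolling hash of the window starting at j
-- (Python's l[j] and l[j+m] are in range whenever the loop reads them, so List.getD is exact)
def fAltLoop (s l : List Int) (m n : Nat) (top hs : Int) (h : Int) (j : Nat) : String :=
  if h = hs ∧ PySem.List.slice l (some (j : Int)) (some ((j : Int) + (m : Int))) = s then "Yes"
  else if _hstop : n ≤ j + m then "No"
  else fAltLoop s l m n top hs
      (PySem.Int.mod ((h - l.getD j 0 * top) * pvBASE + l.getD (j + m) 0) pvP) (j + 1)
termination_by n - j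

def f_alt (a : List Int) (b : List Int) : String :=
  let sl := if a.length > b.length then (b, a) else (a, b)
  let s := sl.1
  let l := sl.2
  let m := s.length
  let n := l.length
  if m = 0 then "Yes"
  else
    fAltLoop s l m n (PySem.Int.powMod pvBASE (m - 1) pvP)
      (s.foldl (fun h v => PySem.Int.mod (h * pvBASE + v) pvP) 0)
      ((l.take m).foldl (fun h v => PySem.Int.mod (h * pvBASE + v) pvP) 0) 0

-- ===== PRECONDITION & SPEC =====
-- When the shorter list occurs as a contiguous block of the longer one ONLY as its
-- suffix (including two lists of equal length that are equal), A returns "No" because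
-- its loop never checks the window ending at the last element, while B returns the
-- intended "Yes".
def D_f (a : List Int) (b : List Int) : Prop :=
  let s := if a.length > b.length then b else a
  let l := if a.length > b.length then a else b
  s <:+ l ∧ ∀ j < l.length - s.length, ¬ s <+: l.drop j
instance (a : List Int) (b : List Int) : Decidable (D_f a b) := by unfold D_f; infer_instance

def Spec_f (a : List Int) (b : List Int) (out : String) : Prop := ¬ D_f a b → out = f_alt a b
instance (a : List Int) (b : List Int) (out : String) : Decidable (Spec_f a b out) := by unfold Spec_f; infer_instance

def pvDiffWitness_f : List Int × List Int := ([1, 2], [2])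
def pvDiffWitnessOut_f : String × String := ("No", "Yes")

-- ===== CLAIM (what is proved, stated in full; the proofs are below) =====
def Claim_unchanged_f : Prop := ∀ (a : List Int) (b : List Int), Dom_f a b → Spec_f a b (f a b)
def Claim_changed_f : Prop := Dom_f (pvDiffWitness_f.1) (pvDiffWitness_f.2) ∧ D_f (pvDiffWitness_f.1) (pvDiffWitness_f.2) ∧ f (pvDiffWitness_f.1) (pvDiffWitness_f.2) = pvDiffWitnessOut_f.1 ∧ f_alt (pvDiffWitness_f.1) (pvDiffWitness_f.2) = pvDiffWitnessOut_f.2 ∧ pvDiffWitnessOut_f.1 ≠ pvDiffWitnessOut_f.2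
def Claim_exact_f : Prop := ∀ (a : List Int) (b : List Int), Dom_f a b → D_f a b → f a b ≠ f_alt a b

-- ===== LEMMAS AND PROOFS =====

-- the (unreduced) polynomial hash that B's rolling hash tracks modulo pvP
def pvHash (xs : List Int) : Int := xs.foldl (fun h v => h * pvBASE + v) 0

lemma pvP_pos : (0 : Int) < pvP := by norm_num [pvP]

lemma pvHash_foldl (xs : List Int) (c : Int) :
    xs.foldl (fun h v => h * pvBASE + v) c = c * pvBASE ^ xs.length + pvHash xs := by
  induction xs generalizing c with
  | nil => simp [pvHash]
  | cons x t ih =>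
    simp only [List.foldl_cons, List.length_cons, pvHash]
    rw [ih (c * pvBASE + x), ih (0 * pvBASE + x)]
    ring

lemma modfold_eq (xs : List Int) (hne : xs ≠ []) :
    ∀ (c1 c2 : Int), c1 % pvP = c2 % pvP →
    xs.foldl (fun h v => PySem.Int.mod (h * pvBASE + v) pvP) c1
      = (xs.foldl (fun h v => h * pvBASE + v) c2) % pvP := by
  induction xs with
  | nil => simp at hne
  | cons x t ih =>
    intro c1 c2 hc
    simp only [List.foldl_cons]
    rw [PySem.Int.mod_eq_emod_of_pos pvP_pos]
    rcases t with _ | ⟨y, t'⟩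
    · simpa using ((Int.ModEq.mul_right pvBASE hc).add_right x)
    · exact ih (by simp) _ _ (by
        have h1 : (c1 * pvBASE + x) % pvP % pvP = (c1 * pvBASE + x) % pvP :=
          Int.emod_emod_of_dvd _ dvd_rfl
        have h2 : (c1 * pvBASE + x) % pvP = (c2 * pvBASE + x) % pvP :=
          (Int.ModEq.mul_right pvBASE hc).add_right x
        rw [h1, h2])

lemma window_cons (l : List Int) (j m : Nat) (hj : j < l.length) (hm : 0 < m) :
    (l.drop j).take m = l.getD j 0 :: (l.drop (j + 1)).take (m - 1) := by
  rcases m with _ | m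
  · omega
  · rw [List.drop_eq_getElem_cons hj, List.take_succ_cons, List.getD_eq_getElem l 0 hj]
    simp

lemma window_snoc (l : List Int) (j m : Nat) (hm : 0 < m) (hjm : j + m < l.length) :
    (l.drop (j + 1)).take m = (l.drop (j + 1)).take (m - 1) ++ [l.getD (j + m) 0] := by
  rcases m with _ | m
  · omega
  · rw [List.take_add_one]
    have hidx : j + 1 + m < l.length := by omega
    have h1 : (l.drop (j + 1))[m]? = some (l.getD (j + (m + 1)) 0) := by
      have e : j + (m + 1) = j + 1 + m := by omega
      rw [e, List.getElem?_drop, List.getElem?_eq_getElem hidx,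
        List.getD_eq_getElem l 0 (by omega : j + 1 + m < l.length)]
    simp [h1]

lemma fLoop_yes_or_no (x y : List Int) (i : Nat) : fLoop x y i = "Yes" ∨ fLoop x y i = "No" := by
  induction hd : x.length - i generalizing i with
  | zero => rw [fLoop]; simp only [show ¬ i < x.length by omega, dite_false]; right; trivial
  | succ d ih =>
    rw [fLoop]
    simp only [show i < x.length by omega, dite_true]
    split
    · left; rfl
    · exact ih (i + 1) (by omega)

lemma slice_window (x y : List Int) (i : Nat) (hy : y.length ≤ i) :
    PySem.List.slice x (some ((i : Int) - (y.length : Int))) (some (i : Int))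
      = (x.drop (i - y.length)).take y.length := by
  have e1 : ((i : Int) - (y.length : Int)) = ((i - y.length : Nat) : Int) := by push_cast [hy]; ring
  have e2 : (i : Int) = ((i - y.length : Nat) : Int) + (y.length : Int) := by push_cast [hy]; ring
  rw [e1, e2, PySem.List.slice_natCast_add]

lemma fLoop_eq_yes_iff (x y : List Int) (i : Nat) (hy : y.length ≤ i) :
    fLoop x y i = "Yes" ↔
      ∃ k, i ≤ k ∧ k < x.length ∧ (x.drop (k - y.length)).take y.length = y := by
  induction hd : x.length - i generalizing i with
  | zero =>
    rw [fLoop]; simp only [show ¬ i < x.length by omega, dite_false]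
    constructor
    · intro h; simp at h
    · rintro ⟨k, hk1, hk2, -⟩; omega
  | succ d ih =>
    rw [fLoop]
    simp only [show i < x.length by omega, dite_true]
    rw [slice_window x y i hy]
    split
    · rename_i hw
      constructor
      · intro _; exact ⟨i, le_refl i, by omega, hw⟩
      · intro _; rfl
    · rename_i hw
      rw [ih (i + 1) (by omega) (by omega)]
      constructor
      · rintro ⟨k, hk1, hk2, hk3⟩; exact ⟨k, by omega, hk2, hk3⟩
      · rintro ⟨k, hk1, hk2, hk3⟩
        refine ⟨k, ?_, hk2, hk3⟩
        rcases Nat.eq_or_lt_of_le hk1 with rfl | h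
        · exact absurd hk3 hw
        · omega

lemma fAltLoop_yes_or_no (s l : List Int) (m n : Nat) (top hs h : Int) (j : Nat) :
    fAltLoop s l m n top hs h j = "Yes" ∨ fAltLoop s l m n top hs h j = "No" := by
  induction hd : n - j generalizing h j with
  | zero =>
    rw [fAltLoop]
    split
    · left; rfl
    · simp only [show n ≤ j + m by omega, dite_true]; right; trivial
  | succ d ih =>
    rw [fAltLoop]
    split
    · left; rfl
    · split
      · right; rfl
      · exact ih _ _ (by omega)

-- the rolling-hash update step preserves the invariant
lemma roll_step (s l : List Int) (top h : Int)
    (hm : 0 < s.length) (j : Nat) (hjm : j + s.length < l.length)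
    (htop : top % pvP = pvBASE ^ (s.length - 1) % pvP)
    (hinv : h = pvHash ((l.drop j).take s.length) % pvP) :
    PySem.Int.mod ((h - l.getD j 0 * top) * pvBASE + l.getD (j + s.length) 0) pvP
      = pvHash ((l.drop (j + 1)).take s.length) % pvP := by
  set m := s.length with hm'
  set t := (l.drop (j + 1)).take (m - 1) with ht
  have hlt : t.length = m - 1 := by
    rw [ht, List.length_take, List.length_drop]; omega
  have hw1 : (l.drop j).take m = l.getD j 0 :: t := window_cons l j m (by omega) hm
  have hw2 : (l.drop (j + 1)).take m = t ++ [l.getD (j + m) 0] := window_snoc l j m hm hjm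
  have hv1 : pvHash ((l.drop j).take m) = l.getD j 0 * pvBASE ^ (m - 1) + pvHash t := by
    rw [hw1]
    show List.foldl _ _ (_ :: t) = _
    rw [List.foldl_cons, pvHash_foldl, hlt]
    ring
  have hv2 : pvHash ((l.drop (j + 1)).take m) = pvHash t * pvBASE + l.getD (j + m) 0 := by
    rw [hw2]
    show List.foldl _ _ (t ++ _) = _
    rw [List.foldl_append, pvHash_foldl]
    unfold pvHash
    simp
  rw [PySem.Int.mod_eq_emod_of_pos pvP_pos, hv2]
  have congr1 : (h - l.getD j 0 * top) * pvBASE + l.getD (j + m) 0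
      ≡ pvHash t * pvBASE + l.getD (j + m) 0 [ZMOD pvP] := by
    have hh : h ≡ pvHash ((l.drop j).take m) [ZMOD pvP] := by
      rw [hinv]; exact (Int.emod_emod_of_dvd _ dvd_rfl)
    have htop' : top ≡ pvBASE ^ (m - 1) [ZMOD pvP] := htop
    have hsub : h - l.getD j 0 * top ≡ pvHash t [ZMOD pvP] := by
      have := hh.sub (htop'.mul_left (l.getD j 0))
      rw [hv1] at this
      simpa using this
    exact (hsub.mul_right pvBASE).add_right _
  exact congr1

lemma fAltLoop_char (s l : List Int) (hm : 0 < s.length) (hmn : s.length ≤ l.length)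
    (top hs : Int) (htop : top % pvP = pvBASE ^ (s.length - 1) % pvP)
    (hhs : hs = pvHash s % pvP) :
    ∀ j h, j ≤ l.length - s.length → h = pvHash ((l.drop j).take s.length) % pvP →
      (fAltLoop s l s.length l.length top hs h j = "Yes" ↔
        ∃ k, j ≤ k ∧ k ≤ l.length - s.length ∧ (l.drop k).take s.length = s) := by
  intro j
  induction hd : l.length - s.length - j generalizing j with
  | zero =>
    intro h hj hinv
    rw [fAltLoop]
    have hsl : PySem.List.slice l (some (j : Int)) (some ((j : Int) + (s.length : Int)))
        = (l.drop j).take s.length := PySem.List.slice_natCast_add l j s.length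
    by_cases hw : (l.drop j).take s.length = s
    · have hh : h = hs := by rw [hinv, hw, hhs]
      simp only [hsl, hh, hw, and_self, if_true]
      exact ⟨fun _ => ⟨j, le_refl j, by omega, hw⟩, fun _ => trivial⟩
    · have hcond : ¬ (h = hs ∧ (l.drop j).take s.length = s) := fun ⟨_, h2⟩ => hw h2
      simp only [hsl, hcond, if_false]
      simp only [show l.length ≤ j + s.length by omega, dite_true]
      constructor
      · intro h; simp at h
      · rintro ⟨k, hk1, hk2, hk3⟩
        have : k = j := by omega
        subst this
        exact absurd hk3 hw
  | succ d ih =>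
    intro h hj hinv
    rw [fAltLoop]
    have hsl : PySem.List.slice l (some (j : Int)) (some ((j : Int) + (s.length : Int)))
        = (l.drop j).take s.length := PySem.List.slice_natCast_add l j s.length
    by_cases hw : (l.drop j).take s.length = s
    · have hh : h = hs := by rw [hinv, hw, hhs]
      simp only [hsl, hh, hw, and_self, if_true]
      exact ⟨fun _ => ⟨j, le_refl j, by omega, hw⟩, fun _ => trivial⟩
    · have hcond : ¬ (h = hs ∧ (l.drop j).take s.length = s) := fun ⟨_, h2⟩ => hw h2
      simp only [hsl, hcond, if_false]
      have hlt : ¬ l.length ≤ j + s.length := by omega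
      simp only [hlt, dite_false]
      rw [ih (j + 1) (by omega) _ (by omega)
        (roll_step s l top h hm j (by omega) htop hinv)]
      constructor
      · rintro ⟨k, hk1, hk2, hk3⟩; exact ⟨k, by omega, hk2, hk3⟩
      · rintro ⟨k, hk1, hk2, hk3⟩
        refine ⟨k, ?_, hk2, hk3⟩
        rcases Nat.eq_or_lt_of_le hk1 with rfl | hlt2
        · exact absurd hk3 hw
        · omega

lemma falt_char (s l : List Int) (hmn : s.length ≤ l.length) (out : String)
    (hl : (if s.length = 0 then "Yes"
      else fAltLoop s l s.length l.length (PySem.Int.powMod pvBASE (s.length - 1) pvP)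
        (s.foldl (fun h v => PySem.Int.mod (h * pvBASE + v) pvP) 0)
        ((l.take s.length).foldl (fun h v => PySem.Int.mod (h * pvBASE + v) pvP) 0) 0) = out) :
    (out = "Yes" ↔ ∃ k, k ≤ l.length - s.length ∧ (l.drop k).take s.length = s) := by
  by_cases hm : s.length = 0
  · have hs0 : s = [] := List.length_eq_zero_iff.mp hm
    subst hs0
    simp only [List.length_nil, if_true] at hl
    subst hl
    exact ⟨fun _ => ⟨0, Nat.zero_le _, by simp⟩, fun _ => rfl⟩
  · have hm' : 0 < s.length := Nat.pos_of_ne_zero hm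
    simp only [hm, if_false] at hl
    subst hl
    have hsne : s ≠ [] := by intro h; subst h; simp at hm'
    have htne : l.take s.length ≠ [] :=
      List.ne_nil_of_length_pos (by rw [List.length_take]; omega)
    have htop : PySem.Int.powMod pvBASE (s.length - 1) pvP % pvP
        = pvBASE ^ (s.length - 1) % pvP := by
      rw [PySem.Int.powMod_eq_emod pvBASE (s.length - 1) pvP_pos]
      exact Int.emod_emod_of_dvd _ dvd_rfl
    have hhs : s.foldl (fun h v => PySem.Int.mod (h * pvBASE + v) pvP) 0 = pvHash s % pvP :=
      modfold_eq s hsne 0 0 rfl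
    have hh0 : (l.take s.length).foldl (fun h v => PySem.Int.mod (h * pvBASE + v) pvP) 0
        = pvHash ((l.drop 0).take s.length) % pvP := by
      rw [List.drop_zero]
      exact modfold_eq (l.take s.length) htne 0 0 rfl
    rw [fAltLoop_char s l hm' hmn _ _ htop hhs 0 _ (by omega) hh0]
    constructor
    · rintro ⟨k, -, hk2, hk3⟩; exact ⟨k, hk2, hk3⟩
    · rintro ⟨k, hk2, hk3⟩; exact ⟨k, Nat.zero_le k, hk2, hk3⟩

lemma fA_char (s l : List Int) (hmn : s.length ≤ l.length) :
    (fLoop l s s.length = "Yes" ↔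
      ∃ j, j < l.length - s.length ∧ (l.drop j).take s.length = s) := by
  rw [fLoop_eq_yes_iff l s s.length (le_refl _)]
  constructor
  · rintro ⟨k, hk1, hk2, hk3⟩
    exact ⟨k - s.length, by omega, hk3⟩
  · rintro ⟨j, hj1, hj2⟩
    refine ⟨j + s.length, by omega, by omega, ?_⟩
    simpa using hj2

-- the body of f_alt after the ordered pair (s, l) has been chosen
def fAltBody (s l : List Int) : String :=
  if s.length = 0 then "Yes"
  else fAltLoop s l s.length l.length (PySem.Int.powMod pvBASE (s.length - 1) pvP)
    (s.foldl (fun h v => PySem.Int.mod (h * pvBASE + v) pvP) 0)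
    ((l.take s.length).foldl (fun h v => PySem.Int.mod (h * pvBASE + v) pvP) 0) 0

lemma f_alt_eq_body (a b : List Int) :
    f_alt a b = fAltBody (if a.length > b.length then b else a)
      (if a.length > b.length then a else b) := by
  by_cases hab : a.length > b.length <;> simp [f_alt, fAltBody, hab]

lemma fB_char (s l : List Int) (hmn : s.length ≤ l.length) :
    (fAltBody s l = "Yes" ↔
      ∃ k, k ≤ l.length - s.length ∧ (l.drop k).take s.length = s) :=
  falt_char s l hmn _ rfl

lemma fB_yes_or_no (s l : List Int) : fAltBody s l = "Yes" ∨ fAltBody s l = "No" := by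
  unfold fAltBody
  split
  · left; rfl
  · exact fAltLoop_yes_or_no _ _ _ _ _ _ _ _

lemma core_unchanged (s l : List Int) (hmn : s.length ≤ l.length)
    (hnd : ¬ (s <:+ l ∧ ∀ j < l.length - s.length, ¬ s <+: l.drop j)) :
    fLoop l s s.length = fAltBody s l := by
  by_cases hE : ∃ j, j < l.length - s.length ∧ (l.drop j).take s.length = s
  · rw [(fA_char s l hmn).mpr hE]
    obtain ⟨j, hj1, hj2⟩ := hE
    rw [(fB_char s l hmn).mpr ⟨j, le_of_lt hj1, hj2⟩]
  · have hA : fLoop l s s.length = "No" := by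
      rcases fLoop_yes_or_no l s s.length with h | h
      · exact absurd ((fA_char s l hmn).mp h) hE
      · exact h
    have hB : fAltBody s l = "No" := by
      rcases fB_yes_or_no s l with h | h
      · obtain ⟨k, hk1, hk2⟩ := (fB_char s l hmn).mp h
        rcases Nat.lt_or_ge k (l.length - s.length) with hlt | hge
        · exact absurd ⟨k, hlt, hk2⟩ hE
        · have hk : k = l.length - s.length := by omega
          subst hk
          exfalso
          apply hnd
          have hlen : (l.drop (l.length - s.length)).length = s.length := by
            rw [List.length_drop]; omega
          have hdrop : l.drop (l.length - s.length) = s := by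
            conv_lhs => rw [← List.take_of_length_le (le_of_eq hlen)]
            exact hk2
          constructor
          · rw [List.suffix_iff_eq_drop]
            exact hdrop.symm
          · intro j hj hp
            apply hE
            refine ⟨j, hj, ?_⟩
            rw [List.prefix_iff_eq_take] at hp
            exact hp.symm
      · exact h
    rw [hA, hB]

lemma core_changed (s l : List Int) (hmn : s.length ≤ l.length)
    (hd : s <:+ l ∧ ∀ j < l.length - s.length, ¬ s <+: l.drop j) :
    fLoop l s s.length = "No" ∧ fAltBody s l = "Yes" := by
  obtain ⟨hsuf, hnp⟩ := hd
  have hw : (l.drop (l.length - s.length)).take s.length = s := by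
    rw [List.suffix_iff_eq_drop] at hsuf
    rw [← hsuf]
    simp
  constructor
  · rcases fLoop_yes_or_no l s s.length with h | h
    · obtain ⟨j, hj1, hj2⟩ := (fA_char s l hmn).mp h
      exact absurd (by rw [List.prefix_iff_eq_take]; exact hj2.symm) (hnp j hj1)
    · exact h
  · exact (fB_char s l hmn).mpr ⟨l.length - s.length, le_refl _, hw⟩

-- ===== VERDICT (by name: the statement is the Claim_ definition above) =====
theorem f_spec : Claim_unchanged_f := by
  intro a b _dom hnd
  show f a b = f_alt a b
  rw [f_alt_eq_body]
  by_cases hab : a.length > b.length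
  · simp only [D_f, hab, if_true] at hnd
    simp only [f, if_pos hab]
    exact core_unchanged b a (le_of_lt hab) hnd
  · simp only [D_f, hab, if_false] at hnd
    simp only [f, if_neg hab]
    exact core_unchanged a b (by omega) hnd

theorem f_changed : Claim_changed_f := by
  unfold Claim_changed_f
  have hd : D_f (pvDiffWitness_f.1) (pvDiffWitness_f.2) := by decide
  refine ⟨by decide, hd, ?_, ?_, by decide⟩
  · simp only [pvDiffWitness_f, pvDiffWitnessOut_f] at hd ⊢
    simp only [D_f, show ([1, 2] : List Int).length > ([2] : List Int).length by decide,
      if_true] at hd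
    simp only [f, if_pos (show ([1, 2] : List Int).length > ([2] : List Int).length by decide)]
    exact (core_changed [2] [1, 2] (by decide) hd).1
  · simp only [pvDiffWitness_f, pvDiffWitnessOut_f] at hd ⊢
    simp only [D_f, show ([1, 2] : List Int).length > ([2] : List Int).length by decide,
      if_true] at hd
    rw [f_alt_eq_body]
    simp only [show ([1, 2] : List Int).length > ([2] : List Int).length by decide, if_true]
    exact (core_changed [2] [1, 2] (by decide) hd).2

theorem f_tight : Claim_exact_f := by
  intro a b _dom hd
  rw [f_alt_eq_body]
  by_cases hab : a.length > b.length
  · simp only [D_f, hab, if_true] at hd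
    simp only [f, if_pos hab]
    obtain ⟨h1, h2⟩ := core_changed b a (le_of_lt hab) hd
    rw [h1, h2]; decide
  · simp only [D_f, hab, if_false] at hd
    simp only [f, if_neg hab]
    obtain ⟨h1, h2⟩ := core_changed a b (by omega) hd
    rw [h1, h2]; decide
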